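-- pv_equiv track=rewrite | github.com/SanjayBukka/doc-whisper-agent | backend/analyzer/style_analyzer.py | _analyze_punctuation
-- ===== SOURCE A (Python) =====
-- def _analyze_punctuation(content):
--     """Analyze punctuation consistency"""
--
--     # Count different punctuation marks
--     periods = content.count('.')
--     commas = content.count(',')
--     semicolons = content.count(';')
--     colons = content.count(':')
--
--     # Check for consistent list punctuation
--     # This is a simplified check
--
--     return {
--         'periods': periods,
--         'commas': commas,
--         'semicolons': semicolons,
--         'colons': colons,
--         'punctuation_variety': len([x for x in [periods, commas, semicolons, colons] if x > 0])
--     }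
-- ===== SOURCE B (Python) =====
-- def _analyze_punctuation(content):
--     """Analyze punctuation consistency (one online pass; variety maintained incrementally)."""
--     periods = commas = semicolons = colons = variety = 0
--     for ch in content:
--         if ch == '.':
--             if periods == 0:
--                 variety += 1
--             periods += 1
--         elif ch == ',':
--             if commas == 0:
--                 variety += 1
--             commas += 1
--         elif ch == ';':
--             if semicolons == 0:
--                 variety += 1
--             semicolons += 1
--         elif ch == ':':
--             if colons == 0:
--                 variety += 1
--             colons += 1
--     return {
--         'periods': periods,
--         'commas': commas,
--         'semicolons': semicolons,
--         'colons': colons,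
--         'punctuation_variety': variety,
--     }
-- ===== Notes on version B (the rewrite author's own statement) =====
-- stated objective: alternative
-- what changed: Replaces four separate content.count scans plus a filtered-list length with one online pass over content that keeps four counters and updates punctuation_variety incrementally, exactly when a counter first becomes positive.
import Mathlib
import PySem

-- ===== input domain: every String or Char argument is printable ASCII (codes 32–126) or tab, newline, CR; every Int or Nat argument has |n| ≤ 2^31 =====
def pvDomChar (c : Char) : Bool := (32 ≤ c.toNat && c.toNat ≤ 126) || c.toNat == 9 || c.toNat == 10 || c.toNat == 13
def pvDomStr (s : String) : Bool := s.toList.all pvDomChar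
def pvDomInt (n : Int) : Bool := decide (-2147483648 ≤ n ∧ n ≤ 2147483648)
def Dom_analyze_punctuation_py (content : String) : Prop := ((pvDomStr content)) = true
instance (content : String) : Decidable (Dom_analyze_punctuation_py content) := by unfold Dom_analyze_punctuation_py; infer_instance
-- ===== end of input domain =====

-- B replaces A's four separate substring-count scans (plus a filtered-list length) by one
-- online pass over the string keeping four counters and updating the variety incrementally;
-- same results, alternative structure.


-- ===== PORT A =====
def analyze_punctuation_py (content : String) : List (String × Int) :=
  let periods : Int := (PySem.Str.count content "." : Int)
  let commas : Int := (PySem.Str.count content "," : Int)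
  let semicolons : Int := (PySem.Str.count content ";" : Int)
  let colons : Int := (PySem.Str.count content ":" : Int)
  [("periods", periods),
   ("commas", commas),
   ("semicolons", semicolons),
   ("colons", colons),
   ("punctuation_variety",
     (([periods, commas, semicolons, colons].filter (fun x => 0 < x)).length : Int))]

-- ===== PORT B =====
-- one step of B's loop body: update the four counters and, when a counter first
-- becomes positive, the variety
def pvStepB (s : Int × Int × Int × Int × Int) (ch : Char) : Int × Int × Int × Int × Int :=
  let (p, c, sc, co, v) := s
  if ch = '.' then (p + 1, c, sc, co, if p = 0 then v + 1 else v)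
  else if ch = ',' then (p, c + 1, sc, co, if c = 0 then v + 1 else v)
  else if ch = ';' then (p, c, sc + 1, co, if sc = 0 then v + 1 else v)
  else if ch = ':' then (p, c, sc, co + 1, if co = 0 then v + 1 else v)
  else s

def analyze_punctuation_py_alt (content : String) : List (String × Int) :=
  let st := content.toList.foldl pvStepB (0, 0, 0, 0, 0)
  let (periods, commas, semicolons, colons, variety) := st
  [("periods", periods),
   ("commas", commas),
   ("semicolons", semicolons),
   ("colons", colons),
   ("punctuation_variety", variety)]

-- ===== PRECONDITION & SPEC =====
def Spec_analyze_punctuation_py (content : String) (out : List (String × Int)) : Prop := out = analyze_punctuation_py_alt content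
instance (content : String) (out : List (String × Int)) : Decidable (Spec_analyze_punctuation_py content out) := by unfold Spec_analyze_punctuation_py; infer_instance

-- ===== CLAIM (what is proved, stated in full; the proofs are below) =====
def Claim_equal_analyze_punctuation_py : Prop := ∀ (content : String), Dom_analyze_punctuation_py content → Spec_analyze_punctuation_py content (analyze_punctuation_py content)

-- ===== LEMMAS AND PROOFS =====

-- number of positive values among four counters
def pvVar (p c sc co : Int) : Int :=
  (if 0 < p then 1 else 0) + (if 0 < c then 1 else 0) +
  (if 0 < sc then 1 else 0) + (if 0 < co then 1 else 0)

-- Python's str.count with a ONE-character needle equals the character count of the list.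
theorem chars_count_go_singleton (c : Char) (l : List Char) (fuel acc : Nat)
    (h : l.length ≤ fuel) :
    PySem.Chars.count.go [c] fuel l acc = acc + l.count c := by
  induction l generalizing fuel acc with
  | nil =>
    cases fuel <;> simp [PySem.Chars.count.go]
  | cons hd tl ih =>
    cases fuel with
    | zero => simp at h
    | succ n =>
      simp only [List.length_cons, Nat.succ_le_succ_iff] at h
      by_cases hc : hd = c
      · subst hc
        simp [PySem.Chars.count.go, List.isPrefixOf, ih n (acc + 1) h]
        omega
      · simp [PySem.Chars.count.go, List.isPrefixOf, hc, ih n acc h, Ne.symm hc]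

theorem chars_count_singleton (c : Char) (l : List Char) :
    PySem.Chars.count l [c] = l.count c := by
  simp [PySem.Chars.count, chars_count_go_singleton c l l.length 0 le_rfl]

theorem str_count_singleton (s t : String) (c : Char) (h : t.toList = [c]) :
    PySem.Str.count s t = s.toList.count c := by
  rw [PySem.Str.count_eq, h, chars_count_singleton]

-- when a counter first becomes positive, the variety field gains one; these four
-- lemmas say the incremental update keeps it equal to the count of positive counters
theorem pvVar_step_p (p c sc co : Int) (hp : 0 ≤ p) :
    (if p = 0 then pvVar p c sc co + 1 else pvVar p c sc co) = pvVar (p + 1) c sc co := by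
  unfold pvVar; split_ifs <;> omega

theorem pvVar_step_c (p c sc co : Int) (hc : 0 ≤ c) :
    (if c = 0 then pvVar p c sc co + 1 else pvVar p c sc co) = pvVar p (c + 1) sc co := by
  unfold pvVar; split_ifs <;> omega

theorem pvVar_step_sc (p c sc co : Int) (hsc : 0 ≤ sc) :
    (if sc = 0 then pvVar p c sc co + 1 else pvVar p c sc co) = pvVar p c (sc + 1) co := by
  unfold pvVar; split_ifs <;> omega

theorem pvVar_step_co (p c sc co : Int) (hco : 0 ≤ co) :
    (if co = 0 then pvVar p c sc co + 1 else pvVar p c sc co) = pvVar p c sc (co + 1) := by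
  unfold pvVar; split_ifs <;> omega

-- loop invariant for B: starting from nonnegative counters with a consistent variety,
-- the fold adds the character counts of the rest of the string and keeps the variety
-- consistent with the final counters.
theorem foldl_stepB (l : List Char) (p c sc co : Int)
    (hp : 0 ≤ p) (hc : 0 ≤ c) (hsc : 0 ≤ sc) (hco : 0 ≤ co) :
    l.foldl pvStepB (p, c, sc, co, pvVar p c sc co) =
      (p + l.count '.', c + l.count ',', sc + l.count ';', co + l.count ':',
       pvVar (p + l.count '.') (c + l.count ',') (sc + l.count ';') (co + l.count ':')) := by
  induction l generalizing p c sc co with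
  | nil => simp
  | cons hd tl ih =>
    rw [List.foldl_cons]
    by_cases h1 : hd = '.'
    · have hstep : pvStepB (p, c, sc, co, pvVar p c sc co) hd =
          (p + 1, c, sc, co, pvVar (p + 1) c sc co) := by
        subst h1; simp [pvStepB]; rw [pvVar_step_p p c sc co hp]
      rw [hstep, ih (p + 1) c sc co (by omega) hc hsc hco]
      subst h1
      simp
      ring_nf
      exact ⟨trivial, trivial⟩
    · by_cases h2 : hd = ','
      · have hstep : pvStepB (p, c, sc, co, pvVar p c sc co) hd =
            (p, c + 1, sc, co, pvVar p (c + 1) sc co) := by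
          subst h2
          simp [pvStepB]
          rw [pvVar_step_c p c sc co hc]
        rw [hstep, ih p (c + 1) sc co hp (by omega) hsc hco]
        subst h2
        simp [h1]
        ring_nf
        exact ⟨trivial, trivial⟩
      · by_cases h3 : hd = ';'
        · have hstep : pvStepB (p, c, sc, co, pvVar p c sc co) hd =
              (p, c, sc + 1, co, pvVar p c (sc + 1) co) := by
            subst h3
            simp [pvStepB]
            rw [pvVar_step_sc p c sc co hsc]
          rw [hstep, ih p c (sc + 1) co hp hc (by omega) hco]
          subst h3
          simp [h1, h2]
          ring_nf
          exact ⟨trivial, trivial⟩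
        · by_cases h4 : hd = ':'
          · have hstep : pvStepB (p, c, sc, co, pvVar p c sc co) hd =
                (p, c, sc, co + 1, pvVar p c sc (co + 1)) := by
              subst h4
              simp [pvStepB]
              rw [pvVar_step_co p c sc co hco]
            rw [hstep, ih p c sc (co + 1) hp hc hsc (by omega)]
            subst h4
            simp [h1, h2, h3]
            ring_nf
            exact ⟨trivial, trivial⟩
          · have hstep : pvStepB (p, c, sc, co, pvVar p c sc co) hd =
                (p, c, sc, co, pvVar p c sc co) := by
              simp [pvStepB, h1, h2, h3, h4]
            rw [hstep, ih p c sc co hp hc hsc hco]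
            simp [h1, h2, h3, h4]

theorem filter_four_length (p q r t : Int) :
    ((([p, q, r, t].filter (fun x => 0 < x)).length : Int)) = pvVar p q r t := by
  unfold pvVar
  by_cases hp : 0 < p <;> by_cases hq : 0 < q <;> by_cases hr : 0 < r <;>
    by_cases ht : 0 < t <;> simp [List.filter, hp, hq, hr, ht]

-- ===== VERDICT (by name: the statement is the Claim_ definition above) =====
theorem analyze_punctuation_py_spec : Claim_equal_analyze_punctuation_py := by
  intro content _
  unfold Spec_analyze_punctuation_py analyze_punctuation_py analyze_punctuation_py_alt
  have h1 : PySem.Str.count content "." = content.toList.count '.' := str_count_singleton content "." '.' rfl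
  have h2 : PySem.Str.count content "," = content.toList.count ',' := str_count_singleton content "," ',' rfl
  have h3 : PySem.Str.count content ";" = content.toList.count ';' := str_count_singleton content ";" ';' rfl
  have h4 : PySem.Str.count content ":" = content.toList.count ':' := str_count_singleton content ":" ':' rfl
  have hfold := foldl_stepB content.toList 0 0 0 0 le_rfl le_rfl le_rfl le_rfl
  have hv0 : pvVar 0 0 0 0 = 0 := by decide
  rw [hv0] at hfold
  simp only [h1, h2, h3, h4, hfold, filter_four_length, zero_add]
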